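-- pv_equiv track=rewrite | github.com/hola/challenge_word_classifier | submissions/5746c78163905b3a11d97bf9/src/data.py | arrayGen
-- ===== SOURCE A (Python) =====
-- def arrayGen(chars, num):
--     num = num - 1
--     if num == 0:
--         return chars
--     i = 0
--     tmp_dict = chars
--     while i < num:
--         i = i + 1
--         new_dict = []
--         for c in tmp_dict:
--             for char in chars:
--                 new_dict.append(c+char)
--         tmp_dict = new_dict
--     return tmp_dict
-- ===== SOURCE B (Python) =====
-- def arrayGen(chars, num):
--     if num <= 1:
--         return chars
--     return [c + char for c in arrayGen(chars, num - 1) for char in chars]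
-- ===== Notes on version B (the rewrite author's own statement) =====
-- stated objective: simpler
-- what changed: Replaces A's explicit while-loop with counter and double append-loop building each generation by a direct linear recursion on num that extends the (num-1)-product by each char in a comprehension, preserving prefix-outer/char-inner order.
import Mathlib
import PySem

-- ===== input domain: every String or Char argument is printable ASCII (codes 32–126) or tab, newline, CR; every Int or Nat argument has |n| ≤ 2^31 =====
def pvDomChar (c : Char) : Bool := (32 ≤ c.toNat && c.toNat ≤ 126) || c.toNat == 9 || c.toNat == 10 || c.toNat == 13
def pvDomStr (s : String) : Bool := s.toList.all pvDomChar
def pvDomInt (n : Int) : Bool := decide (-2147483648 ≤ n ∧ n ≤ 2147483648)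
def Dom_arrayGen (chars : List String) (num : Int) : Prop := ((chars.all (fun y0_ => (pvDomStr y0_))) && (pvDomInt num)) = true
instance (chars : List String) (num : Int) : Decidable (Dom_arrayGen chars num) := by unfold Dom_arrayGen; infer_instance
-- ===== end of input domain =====

-- B replaces A's explicit while-loop with counter and appending inner loops by a direct linear
-- recursion on num, extending the (num-1)-product by each char (objective: simpler).

-- ===== PORT A =====
-- while i < num: i += 1; new_dict = []; for c in tmp: for char in chars: new_dict.append(c+char); tmp = new_dict
def arrayGenLoop (chars : List String) (num : Int) (i : Int) (tmp : List String) : List String :=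
  if _h : i < num then
    arrayGenLoop chars num (i + 1)
      (tmp.foldl (fun acc c => chars.foldl (fun acc2 char => acc2 ++ [c ++ char]) acc) [])
  else tmp
termination_by (num - i).toNat
decreasing_by omega

def arrayGen (chars : List String) (num : Int) : List String :=
  let num1 := num - 1
  if num1 = 0 then chars
  else arrayGenLoop chars num1 0 chars

-- ===== PORT B =====
def arrayGen_alt (chars : List String) (num : Int) : List String :=
  if num ≤ 1 then chars
  else (arrayGen_alt chars (num - 1)).flatMap (fun c => chars.map (fun char => c ++ char))
termination_by num.toNat
decreasing_by omega

-- ===== PRECONDITION & SPEC =====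
def Spec_arrayGen (chars : List String) (num : Int) (out : List String) : Prop := out = arrayGen_alt chars num
instance (chars : List String) (num : Int) (out : List String) : Decidable (Spec_arrayGen chars num out) := by unfold Spec_arrayGen; infer_instance

-- ===== CLAIM (what is proved, stated in full; the proofs are below) =====
def Claim_equal_arrayGen : Prop := ∀ (chars : List String) (num : Int), Dom_arrayGen chars num → Spec_arrayGen chars num (arrayGen chars num)

-- ===== LEMMAS AND PROOFS =====

-- one generation step: extend every prefix by every char
def pvStep (chars : List String) (tmp : List String) : List String :=
  tmp.flatMap (fun c => chars.map (fun char => c ++ char))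

-- A's inner double loop builds exactly one pvStep
theorem loop_body_gen (chars tmp : List String) : ∀ (acc : List String),
    tmp.foldl (fun acc c => chars.foldl (fun acc2 char => acc2 ++ [c ++ char]) acc) acc
      = acc ++ pvStep chars tmp := by
  induction tmp with
  | nil => intro acc; simp [pvStep]
  | cons c cs ih =>
    intro acc
    simp only [List.foldl_cons]
    rw [PySem.List.foldl_append_singleton_eq_map (fun char => c ++ char) chars acc]
    rw [ih]
    simp [pvStep]

theorem loop_body_eq (chars tmp : List String) :
    tmp.foldl (fun acc c => chars.foldl (fun acc2 char => acc2 ++ [c ++ char]) acc) []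
      = pvStep chars tmp := by
  simpa using loop_body_gen chars tmp []

-- A's while-loop iterates pvStep (num - i).toNat times
theorem loop_eq_iterate (chars : List String) (num : Int) :
    ∀ (n : Nat) (i : Int) (tmp : List String), (num - i).toNat = n →
      arrayGenLoop chars num i tmp = (pvStep chars)^[n] tmp := by
  intro n
  induction n with
  | zero =>
    intro i tmp h
    rw [arrayGenLoop]
    simp only [Function.iterate_zero, id]
    rw [dif_neg (by omega)]
  | succ k ih =>
    intro i tmp h
    rw [arrayGenLoop, dif_pos (by omega), loop_body_eq]
    rw [ih (i + 1) (pvStep chars tmp) (by omega)]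
    exact (Function.iterate_succ_apply (pvStep chars) k tmp).symm

theorem arrayGen_eq_iterate (chars : List String) (num : Int) :
    arrayGen chars num = (pvStep chars)^[(num - 1).toNat] chars := by
  unfold arrayGen
  by_cases h0 : num - 1 = 0
  · simp [h0]
  · rw [if_neg h0]
    by_cases hneg : num - 1 < 0
    · rw [loop_eq_iterate chars (num - 1) 0 0 chars (by omega)]
      have : (num - 1).toNat = 0 := by omega
      rw [this]
    · exact loop_eq_iterate chars (num - 1) ((num - 1).toNat) 0 chars (by omega)

theorem alt_eq_iterate (chars : List String) :
    ∀ (n : Nat) (num : Int), (num - 1).toNat = n →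
      arrayGen_alt chars num = (pvStep chars)^[n] chars := by
  intro n
  induction n with
  | zero =>
    intro num h
    rw [arrayGen_alt, if_pos (by omega)]
    simp
  | succ k ih =>
    intro num h
    rw [arrayGen_alt, if_neg (by omega)]
    rw [ih (num - 1) (by omega)]
    exact (Function.iterate_succ_apply' (pvStep chars) k chars).symm

-- ===== VERDICT (by name: the statement is the Claim_ definition above) =====
theorem arrayGen_spec : Claim_equal_arrayGen := by
  intro chars num _
  unfold Spec_arrayGen
  rw [arrayGen_eq_iterate, alt_eq_iterate chars ((num - 1).toNat) num rfl]
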